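-- pv_equiv track=rewrite | github.com/TheLonelyDevil9/discord-pals | character.py | _parse_special_user_blocks
-- ===== SOURCE A (Python) =====
-- def _parse_special_user_blocks(section_body: str) -> tuple[dict[str, str], str]:
--     """Parse ### username blocks from a User Context/Special Users section."""
--     special_users = {}
--     orphan_lines = []
--     current_user = None
--     current_context = []
--
--     for raw_line in (section_body or "").splitlines():
--         line = raw_line.rstrip()
--         if line.startswith("### "):
--             if current_user:
--                 special_users[current_user] = "\n".join(current_context).strip()
--             current_user = line[4:].strip()
--             current_context = []
--             continue
--
--         if current_user:
--             current_context.append(line)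
--         elif line.strip():
--             orphan_lines.append(line)
--
--     if current_user:
--         special_users[current_user] = "\n".join(current_context).strip()
--
--     cleaned_users = {
--         user_name: context.strip()
--         for user_name, context in special_users.items()
--         if user_name and context.strip()
--     }
--     orphan_content = "\n".join(orphan_lines).strip()
--     return cleaned_users, orphan_content
-- ===== SOURCE B (Python) =====
-- def _split_at_header(lines):
--     """Split lines into (prefix before first '### ' header, remainder starting at it)."""
--     for i, line in enumerate(lines):
--         if line.startswith("### "):
--             return lines[:i], lines[i:]
--     return lines, []
--
--
-- def _parse_special_user_blocks(section_body: str) -> tuple[dict[str, str], str]: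
--     """Parse ### username blocks from a User Context/Special Users section."""
--     lines = [raw_line.rstrip() for raw_line in (section_body or "").splitlines()]
--     leading, rest = _split_at_header(lines)
--     orphan_lines = [line for line in leading if line.strip()]
--     users = {}
--     while rest:
--         name = rest[0][4:].strip()
--         context, rest = _split_at_header(rest[1:])
--         users[name] = "\n".join(context).strip()
--     cleaned_users = {name: context for name, context in users.items() if context}
--     return cleaned_users, "\n".join(orphan_lines).strip()
-- ===== Notes on version B (the rewrite author's own statement) =====
-- stated objective: alternative
-- what changed: Replaces A's single stateful scan (mode flags current_user/current_context mutated line by line) with a split-at-next-header decomposition: rstrip all lines once, split off the leading orphan group, then repeatedly split the remainder at the next '### ' header to form (name, joined-stripped context) entries.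
import Mathlib
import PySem

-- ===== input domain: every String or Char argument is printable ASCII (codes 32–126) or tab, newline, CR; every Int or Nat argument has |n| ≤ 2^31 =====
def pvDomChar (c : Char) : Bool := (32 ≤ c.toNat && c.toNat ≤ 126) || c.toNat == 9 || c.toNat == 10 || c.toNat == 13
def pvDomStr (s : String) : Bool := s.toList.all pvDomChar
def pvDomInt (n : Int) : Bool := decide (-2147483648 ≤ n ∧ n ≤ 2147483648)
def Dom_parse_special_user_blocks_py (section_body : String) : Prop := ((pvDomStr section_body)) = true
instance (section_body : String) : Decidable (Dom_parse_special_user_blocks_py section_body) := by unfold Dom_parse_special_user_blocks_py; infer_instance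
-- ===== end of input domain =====

-- B replaces A's single stateful scan (mode flags current_user/current_context) by a
-- split-at-next-header decomposition; same cost, provably the same return value.

-- ===== PORT A =====
-- Python truthiness of `current_user : Optional[str]` (None and "" are falsy)
def pvATruthy : Option String → Bool
  | some u => u != ""
  | none => false

-- loop body of A, after `line = raw_line.rstrip()`; state = (special_users, orphan_lines, current_user, current_context)
def pvAStepBody
    (st : PySem.Dict String String × List String × Option String × List String)
    (line : String) :
    PySem.Dict String String × List String × Option String × List String :=
  if PySem.Str.startswith line "### " then
    ((if pvATruthy st.2.2.1 then
        st.1.insert (st.2.2.1.getD "") (PySem.Str.strip (PySem.Str.join "\n" st.2.2.2))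
      else st.1),
     st.2.1, some (PySem.Str.strip (PySem.Str.slice line (some 4) none)), [])
  else if pvATruthy st.2.2.1 then
    (st.1, st.2.1, st.2.2.1, st.2.2.2 ++ [line])
  else if PySem.Str.strip line != "" then
    (st.1, st.2.1 ++ [line], st.2.2.1, st.2.2.2)
  else st

-- one loop iteration of A: `line = raw_line.rstrip()` then the body
def pvAStep
    (st : PySem.Dict String String × List String × Option String × List String)
    (raw_line : String) :
    PySem.Dict String String × List String × Option String × List String :=
  pvAStepBody st (PySem.Str.rstrip raw_line)

-- the trailing `if current_user: special_users[current_user] = ...` flush; returns (special_users, orphan_lines)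
def pvAFinish
    (st : PySem.Dict String String × List String × Option String × List String) :
    PySem.Dict String String × List String :=
  ((if pvATruthy st.2.2.1 then
      st.1.insert (st.2.2.1.getD "") (PySem.Str.strip (PySem.Str.join "\n" st.2.2.2))
    else st.1),
   st.2.1)

-- (`section_body or ""` is `section_body` itself for strings)
def parse_special_user_blocks_py (section_body : String) : (List (String × String)) × String :=
  let fin := (PySem.Str.splitlines section_body).foldl pvAStep (PySem.Dict.empty, [], none, [])
  let sd := pvAFinish fin
  let cleaned := sd.1.items.foldl
    (fun d p => if p.1 != "" && PySem.Str.strip p.2 != "" then d.insert p.1 (PySem.Str.strip p.2) else d)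
    PySem.Dict.empty
  (cleaned.items, PySem.Str.strip (PySem.Str.join "\n" sd.2))

-- ===== PORT B =====
-- Source B's _split_at_header: (lines before the first '### ' header, remainder starting at it)
def pvBSplitAtHeader (lines : List String) : List String × List String :=
  (lines.takeWhile (fun l => !PySem.Str.startswith l "### "),
   lines.dropWhile (fun l => !PySem.Str.startswith l "### "))

-- Source B's `while rest:` loop building `users`
def pvBLoop : List String → PySem.Dict String String → PySem.Dict String String
  | [], users => users
  | h :: t, users =>
    let name := PySem.Str.strip (PySem.Str.slice h (some 4) none)
    let pr := pvBSplitAtHeader t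
    pvBLoop pr.2 (users.insert name (PySem.Str.strip (PySem.Str.join "\n" pr.1)))
termination_by rest _ => rest.length
decreasing_by
  simp [pvBSplitAtHeader]
  exact List.length_dropWhile_le _ _

def parse_special_user_blocks_py_alt (section_body : String) : (List (String × String)) × String :=
  let lines := (PySem.Str.splitlines section_body).map PySem.Str.rstrip
  let pr := pvBSplitAtHeader lines
  let orphan_lines := pr.1.filter (fun l => PySem.Str.strip l != "")
  let users := pvBLoop pr.2 PySem.Dict.empty
  let cleaned := users.items.foldl
    (fun d p => if p.2 != "" then d.insert p.1 p.2 else d)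
    PySem.Dict.empty
  (cleaned.items, PySem.Str.strip (PySem.Str.join "\n" orphan_lines))

-- ===== PRECONDITION & SPEC =====
def Spec_parse_special_user_blocks_py (section_body : String) (out : (List (String × String)) × String) : Prop := out = parse_special_user_blocks_py_alt section_body
instance (section_body : String) (out : (List (String × String)) × String) : Decidable (Spec_parse_special_user_blocks_py section_body out) := by unfold Spec_parse_special_user_blocks_py; infer_instance

-- ===== CLAIM (what is proved, stated in full; the proofs are below) =====
def Claim_equal_parse_special_user_blocks_py : Prop := ∀ (section_body : String), Dom_parse_special_user_blocks_py section_body → Spec_parse_special_user_blocks_py section_body (parse_special_user_blocks_py section_body)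

-- ===== LEMMAS AND PROOFS =====

theorem pv_not_eq_false {b : Bool} (h : (!b) = false) : b = true := by
  cases b <;> simp_all

-- head of a dropWhile result falsifies the predicate
theorem pv_head?_dropWhile {α : Type} (p : α → Bool) (l : List α) {x : α}
    (h : (l.dropWhile p).head? = some x) : p x = false := by
  induction l with
  | nil => simp at h
  | cons a t ih =>
    rw [List.dropWhile_cons] at h
    split at h
    · exact ih h
    · simp_all

-- the last character of a Python-rstripped string is not whitespace
theorem pv_rstrip_getLast? {cs : List Char} {c : Char}
    (h : (PySem.Chars.rstrip cs).getLast? = some c) : PySem.Chars.isspace c = false := by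
  unfold PySem.Chars.rstrip at h
  rw [List.getLast?_reverse] at h
  exact pv_head?_dropWhile _ _ h

-- rstrip of a list whose last element is not whitespace is the list itself
theorem pv_rstrip_eq_self {l : List Char} {c : Char}
    (h : l.getLast? = some c) (hc : PySem.Chars.isspace c = false) :
    PySem.Chars.rstrip l = l := by
  unfold PySem.Chars.rstrip
  cases hr : l.reverse with
  | nil => simp_all
  | cons a r =>
    have ha : a = c := by
      have hh : l.reverse.head? = l.getLast? := List.head?_reverse
      rw [hr, h] at hh; simpa using hh
    subst ha
    rw [List.dropWhile_cons, if_neg (by simp [hc]), ← hr, List.reverse_reverse]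

-- the last element survives lstrip
theorem pv_lstrip_getLast? {cs : List Char} {c : Char}
    (h : cs.getLast? = some c) (hc : PySem.Chars.isspace c = false) :
    (PySem.Chars.lstrip cs).getLast? = some c := by
  unfold PySem.Chars.lstrip
  have hsplit := List.takeWhile_append_dropWhile (p := PySem.Chars.isspace) (l := cs)
  by_cases hd : cs.dropWhile PySem.Chars.isspace = []
  · exfalso
    have hmem : c ∈ cs := List.mem_of_getLast? h
    have hsp : PySem.Chars.isspace c = true := by
      have hmem' : c ∈ cs.takeWhile PySem.Chars.isspace := by
        rw [← hsplit] at hmem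
        rcases List.mem_append.mp hmem with h1 | h2
        · exact h1
        · rw [hd] at h2; simp at h2
      exact List.mem_takeWhile_imp hmem'
    rw [hsp] at hc; exact absurd hc (by decide)
  · have h' : (cs.takeWhile PySem.Chars.isspace ++ cs.dropWhile PySem.Chars.isspace).getLast? = some c := by
      rw [hsplit]; exact h
    rw [List.getLast?_append_of_ne_nil _ hd] at h'
    exact h'

-- strip of a list whose last element is not whitespace is nonempty
theorem pv_strip_ne_nil {cs : List Char} {c : Char}
    (h : cs.getLast? = some c) (hc : PySem.Chars.isspace c = false) :
    PySem.Chars.strip cs ≠ [] := by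
  unfold PySem.Chars.strip
  have hl := pv_lstrip_getLast? h hc
  rw [pv_rstrip_eq_self hl hc]
  intro h0
  rw [h0] at hl; simp at hl

-- head of an rstrip result is the head of the original list
theorem pv_head?_rstrip {cs : List Char} {c : Char}
    (h : (PySem.Chars.rstrip cs).head? = some c) : cs.head? = some c := by
  unfold PySem.Chars.rstrip at h
  have hsuf : (cs.reverse.dropWhile PySem.Chars.isspace) <:+ cs.reverse :=
    List.dropWhile_suffix _
  obtain ⟨pre, hpre⟩ := hsuf
  cases hx : (cs.reverse.dropWhile PySem.Chars.isspace).reverse with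
  | nil => rw [hx] at h; simp at h
  | cons a r =>
    rw [hx] at h
    simp at h
    subst h
    have hcs : cs = (a :: r) ++ pre.reverse := by
      have h2 := congrArg List.reverse hpre
      simpa [hx] using h2.symm
    rw [hcs]; rfl

-- Python strip is idempotent
theorem pv_strip_strip (cs : List Char) :
    PySem.Chars.strip (PySem.Chars.strip cs) = PySem.Chars.strip cs := by
  cases hy : PySem.Chars.strip cs with
  | nil => simp [PySem.Chars.strip, PySem.Chars.lstrip, PySem.Chars.rstrip]
  | cons a t =>
    have hhead : PySem.Chars.isspace a = false := by
      have h1 : (PySem.Chars.strip cs).head? = some a := by rw [hy]; rfl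
      unfold PySem.Chars.strip at h1
      have h2 := pv_head?_rstrip h1
      unfold PySem.Chars.lstrip at h2
      exact pv_head?_dropWhile _ _ h2
    have hlast : ∃ c, (a :: t).getLast? = some c ∧ PySem.Chars.isspace c = false := by
      cases hg : (a :: t).getLast? with
      | none => simp at hg
      | some c =>
        refine ⟨c, rfl, ?_⟩
        have hg2 : (PySem.Chars.strip cs).getLast? = some c := by rw [hy]; exact hg
        unfold PySem.Chars.strip at hg2
        exact pv_rstrip_getLast? hg2
    obtain ⟨c, hg, hcs⟩ := hlast
    unfold PySem.Chars.strip PySem.Chars.lstrip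
    rw [List.dropWhile_cons, if_neg (by simp [hhead])]
    exact pv_rstrip_eq_self hg hcs

-- string versions ------------------------------------------------------------

theorem pv_str_strip_strip (s : String) :
    PySem.Str.strip (PySem.Str.strip s) = PySem.Str.strip s := by
  apply String.toList_inj.mp
  simp [pv_strip_strip]

-- a header line of A/B is always an *rstripped* line, hence its username `line[4:].strip()` is nonempty
theorem pv_header_name (x : String)
    (h : PySem.Str.startswith (PySem.Str.rstrip x) "### " = true) :
    PySem.Str.strip (PySem.Str.slice (PySem.Str.rstrip x) (some 4) none) ≠ "" := by
  have hlist : (PySem.Str.rstrip x).toList = PySem.Chars.rstrip x.toList :=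
    PySem.Str.toList_rstrip x
  have hpre : ['#', '#', '#', ' '] <+: (PySem.Str.rstrip x).toList := by
    have h' := h
    rw [PySem.Str.startswith_eq] at h'
    have h'' := (PySem.Chars.startswith_iff _ _).mp h'
    simpa using h''
  obtain ⟨rest, hrest⟩ := hpre
  have hrest_ne : rest ≠ [] := by
    intro h0
    rw [h0, List.append_nil] at hrest
    have hg : (PySem.Chars.rstrip x.toList).getLast? = some ' ' := by
      rw [← hlist, ← hrest]; rfl
    have hsp := pv_rstrip_getLast? hg
    exact absurd hsp (by decide)
  have hglast : ∃ c, rest.getLast? = some c ∧ PySem.Chars.isspace c = false := by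
    cases hg : rest.getLast? with
    | none => exact absurd (List.getLast?_eq_none_iff.mp hg) hrest_ne
    | some c =>
      refine ⟨c, rfl, ?_⟩
      have hg2 : (PySem.Str.rstrip x).toList.getLast? = some c := by
        rw [← hrest, List.getLast?_append_of_ne_nil _ hrest_ne]; exact hg
      rw [hlist] at hg2
      exact pv_rstrip_getLast? hg2
  obtain ⟨c, hg, hcs⟩ := hglast
  have hslice : (PySem.Str.slice (PySem.Str.rstrip x) (some 4) none).toList = rest := by
    rw [PySem.Str.toList_slice, PySem.Chars.slice_eq_listSlice,
        PySem.List.slice_from _ (by norm_num), ← hrest]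
    rfl
  intro h0
  have hnil : (PySem.Str.strip (PySem.Str.slice (PySem.Str.rstrip x) (some 4) none)).toList = [] := by
    rw [h0]; rfl
  rw [PySem.Str.toList_strip, hslice] at hnil
  exact pv_strip_ne_nil hg hcs hnil

-- step-reduction lemmas for A's loop body -------------------------------------

theorem pvAStep_header_none (su : PySem.Dict String String) (ol cc : List String) (line : String)
    (hb : PySem.Str.startswith line "### " = true) :
    pvAStepBody (su, ol, none, cc) line =
      (su, ol, some (PySem.Str.strip (PySem.Str.slice line (some 4) none)), []) := by
  unfold pvAStepBody
  rw [if_pos hb, if_neg (by simp [pvATruthy])]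

theorem pvAStep_header_some (su : PySem.Dict String String) (ol cc : List String) (line u : String)
    (hb : PySem.Str.startswith line "### " = true) (hu : u ≠ "") :
    pvAStepBody (su, ol, some u, cc) line =
      (su.insert u (PySem.Str.strip (PySem.Str.join "\n" cc)), ol,
       some (PySem.Str.strip (PySem.Str.slice line (some 4) none)), []) := by
  unfold pvAStepBody
  rw [if_pos hb, if_pos (show pvATruthy (some u) = true by simp [pvATruthy]; exact hu)]
  rfl

theorem pvAStep_user (su : PySem.Dict String String) (ol cc : List String) (line u : String)
    (hb : PySem.Str.startswith line "### " = false) (hu : u ≠ "") :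
    pvAStepBody (su, ol, some u, cc) line = (su, ol, some u, cc ++ [line]) := by
  unfold pvAStepBody
  rw [if_neg (by rw [hb]; exact Bool.false_ne_true),
    if_pos (show pvATruthy (some u) = true by simp [pvATruthy]; exact hu)]

theorem pvAStep_orphan (su : PySem.Dict String String) (ol cc : List String) (line : String)
    (hb : PySem.Str.startswith line "### " = false) :
    pvAStepBody (su, ol, none, cc) line =
      if PySem.Str.strip line != "" then (su, ol ++ [line], none, cc) else (su, ol, none, cc) := by
  unfold pvAStepBody
  rw [if_neg (by rw [hb]; exact Bool.false_ne_true), if_neg (by simp [pvATruthy])]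

theorem pvAFinish_none (su : PySem.Dict String String) (ol cc : List String) :
    pvAFinish (su, ol, none, cc) = (su, ol) := by
  unfold pvAFinish
  rw [if_neg (by simp [pvATruthy])]

theorem pvAFinish_some (su : PySem.Dict String String) (ol cc : List String) (u : String)
    (hu : u ≠ "") :
    pvAFinish (su, ol, some u, cc) =
      (su.insert u (PySem.Str.strip (PySem.Str.join "\n" cc)), ol) := by
  unfold pvAFinish
  rw [if_pos (show pvATruthy (some u) = true by simp [pvATruthy]; exact hu)]
  rfl

-- unfolding lemmas for B's loop ------------------------------------------------

theorem pvBLoop_nil (d : PySem.Dict String String) : pvBLoop [] d = d := by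
  simp [pvBLoop]

theorem pvBLoop_cons (h : String) (t : List String) (users : PySem.Dict String String) :
    pvBLoop (h :: t) users =
      pvBLoop (t.dropWhile (fun l => !PySem.Str.startswith l "### "))
        (users.insert (PySem.Str.strip (PySem.Str.slice h (some 4) none))
          (PySem.Str.strip (PySem.Str.join "\n"
            (t.takeWhile (fun l => !PySem.Str.startswith l "### "))))) := by
  conv_lhs => simp only [pvBLoop, pvBSplitAtHeader]

-- ORPHAN PHASE: before the first header A only collects non-blank lines into orphan_lines
theorem pv_orphanPhase (ls : List String) (d : PySem.Dict String String) (ol : List String) :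
    ls.foldl pvAStepBody (d, ol, none, []) =
      (ls.dropWhile (fun l => !PySem.Str.startswith l "### ")).foldl pvAStepBody
        (d, ol ++ (ls.takeWhile (fun l => !PySem.Str.startswith l "### ")).filter
              (fun l => PySem.Str.strip l != ""), none, []) := by
  induction ls generalizing ol with
  | nil => simp
  | cons l t ih =>
    cases hb : PySem.Str.startswith l "### " with
    | true =>
      simp only [List.dropWhile_cons, List.takeWhile_cons, hb, Bool.not_true,
        if_neg (show ¬(false = true) by decide), List.filter_nil, List.append_nil]
    | false =>
      rw [List.foldl_cons, pvAStep_orphan _ _ _ _ hb]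
      by_cases hs : (PySem.Str.strip l != "") = true
      · rw [if_pos hs, ih (ol ++ [l])]
        simp only [List.dropWhile_cons, List.takeWhile_cons, hb, Bool.not_false,
          if_pos trivial, List.filter_cons, hs, List.append_assoc,
          List.singleton_append]
      · have hs' : (PySem.Str.strip l != "") = false := by simpa using hs
        rw [if_neg hs, ih ol]
        simp only [List.dropWhile_cons, List.takeWhile_cons, hb, Bool.not_false,
          if_pos trivial, List.filter_cons, hs',
          if_neg (show ¬(false = true) by decide)]

-- USER PHASE: from a live user on, A's flushed dict is exactly B's split-at-header loop
theorem pv_userPhase (ls : List String) :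
    ∀ (u : String) (d : PySem.Dict String String) (ol cc : List String), u ≠ "" →
    (∀ l ∈ ls, PySem.Str.startswith l "### " = true →
        PySem.Str.strip (PySem.Str.slice l (some 4) none) ≠ "") →
    pvAFinish (ls.foldl pvAStepBody (d, ol, some u, cc)) =
      (pvBLoop (ls.dropWhile (fun l => !PySem.Str.startswith l "### "))
        (d.insert u (PySem.Str.strip (PySem.Str.join "\n"
          (cc ++ ls.takeWhile (fun l => !PySem.Str.startswith l "### "))))), ol) := by
  induction ls with
  | nil =>
    intro u d ol cc hu _
    rw [List.foldl_nil, pvAFinish_some _ _ _ _ hu, List.dropWhile_nil, List.takeWhile_nil,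
      List.append_nil, pvBLoop_nil]
  | cons l t ih =>
    intro u d ol cc hu hnames
    cases hb : PySem.Str.startswith l "### " with
    | true =>
      have hn : PySem.Str.strip (PySem.Str.slice l (some 4) none) ≠ "" :=
        hnames l List.mem_cons_self hb
      rw [List.foldl_cons, pvAStep_header_some _ _ _ _ _ hb hu,
        ih _ _ ol [] hn (fun x hx => hnames x (List.mem_cons_of_mem _ hx))]
      simp only [List.dropWhile_cons, List.takeWhile_cons, hb, Bool.not_true,
        if_neg (show ¬(false = true) by decide), List.append_nil]
      rw [pvBLoop_cons]
      simp only [List.nil_append]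
    | false =>
      rw [List.foldl_cons, pvAStep_user _ _ _ _ _ hb hu,
        ih u d ol (cc ++ [l]) hu (fun x hx => hnames x (List.mem_cons_of_mem _ hx))]
      simp only [List.dropWhile_cons, List.takeWhile_cons, hb, Bool.not_false,
        if_pos trivial, List.append_assoc, List.singleton_append]

-- INVARIANT: every entry of B's users dict has a nonempty key and an already-stripped value
theorem pv_loop_inv : ∀ (n : Nat) (rest : List String) (d : PySem.Dict String String),
    rest.length ≤ n →
    (∀ l ∈ rest, PySem.Str.startswith l "### " = true →
        PySem.Str.strip (PySem.Str.slice l (some 4) none) ≠ "") →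
    (∀ h0, rest.head? = some h0 → PySem.Str.startswith h0 "### " = true) →
    (∀ p ∈ d.items, p.1 ≠ "" ∧ PySem.Str.strip p.2 = p.2) →
    ∀ p ∈ (pvBLoop rest d).items, p.1 ≠ "" ∧ PySem.Str.strip p.2 = p.2 := by
  intro n
  induction n with
  | zero =>
    intro rest d hlen _ _ hinv
    have hn : rest = [] := List.eq_nil_of_length_eq_zero (Nat.le_zero.mp hlen)
    subst hn
    rw [pvBLoop_nil]
    exact hinv
  | succ n ih =>
    intro rest d hlen hnames hhead hinv
    cases rest with
    | nil => rw [pvBLoop_nil]; exact hinv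
    | cons h t =>
      rw [pvBLoop_cons]
      apply ih
      · exact Nat.le_trans (List.length_dropWhile_le _ _) (by simpa using hlen)
      · intro l hl
        exact hnames l (List.mem_cons_of_mem _ ((List.dropWhile_suffix _).subset hl))
      · intro h0 hh0
        exact pv_not_eq_false (pv_head?_dropWhile _ t hh0)
      · intro p hp
        rcases (PySem.Dict.mem_items_insert _ _ _ _).mp hp with hpe | ⟨hpd, _⟩
        · subst hpe
          refine ⟨?_, pv_str_strip_strip _⟩
          exact hnames h List.mem_cons_self (hhead h rfl)
        · exact hinv p hpd

-- the two cleaning comprehensions agree on invariant-satisfying item lists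
theorem pv_cleanedEq : ∀ (its : List (String × String)) (d : PySem.Dict String String),
    (∀ p ∈ its, p.1 ≠ "" ∧ PySem.Str.strip p.2 = p.2) →
    its.foldl (fun d p => if p.1 != "" && PySem.Str.strip p.2 != "" then d.insert p.1 (PySem.Str.strip p.2) else d) d =
    its.foldl (fun d p => if p.2 != "" then d.insert p.1 p.2 else d) d := by
  intro its
  induction its with
  | nil => intro d _; rfl
  | cons p t ih =>
    intro d h
    obtain ⟨h1, h2⟩ := h p List.mem_cons_self
    have h1' : (p.1 != "") = true := bne_iff_ne.mpr h1
    simp only [List.foldl_cons]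
    rw [h2, h1']
    simp only [Bool.true_and]
    exact ih _ (fun q hq => h q (List.mem_cons_of_mem _ hq))

-- the main equation
theorem pv_mainEq (s : String) :
    parse_special_user_blocks_py s = parse_special_user_blocks_py_alt s := by
  have hempty : (PySem.Dict.empty : PySem.Dict String String).items = [] := rfl
  have hfold : (PySem.Str.splitlines s).foldl pvAStep
      (PySem.Dict.empty, ([] : List String), (none : Option String), ([] : List String)) =
      ((PySem.Str.splitlines s).map PySem.Str.rstrip).foldl pvAStepBody
        (PySem.Dict.empty, [], none, []) := by
    rw [List.foldl_map]
    rfl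
  simp only [parse_special_user_blocks_py, parse_special_user_blocks_py_alt, pvBSplitAtHeader]
  rw [hfold]
  set ls := (PySem.Str.splitlines s).map PySem.Str.rstrip with hls
  have hnames : ∀ l ∈ ls, PySem.Str.startswith l "### " = true →
      PySem.Str.strip (PySem.Str.slice l (some 4) none) ≠ "" := by
    intro l hl
    rw [hls] at hl
    obtain ⟨x, _, rfl⟩ := List.mem_map.mp hl
    exact pv_header_name x
  rw [pv_orphanPhase]
  cases hrest : ls.dropWhile (fun l => !PySem.Str.startswith l "### ") with
  | nil =>
    rw [List.foldl_nil, pvAFinish_none, pvBLoop_nil]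
    rfl
  | cons h t =>
    have hh : PySem.Str.startswith h "### " = true :=
      pv_not_eq_false (pv_head?_dropWhile _ ls (by rw [hrest]; rfl))
    have hmem_h : h ∈ ls := (List.dropWhile_suffix _).subset (by rw [hrest]; exact List.mem_cons_self)
    have hmem_t : ∀ l ∈ t, l ∈ ls := fun l hl =>
      (List.dropWhile_suffix _).subset (by rw [hrest]; exact List.mem_cons_of_mem _ hl)
    have hn : PySem.Str.strip (PySem.Str.slice h (some 4) none) ≠ "" := hnames h hmem_h hh
    have hinv : ∀ p ∈ (pvBLoop
        (t.dropWhile (fun l => !PySem.Str.startswith l "### "))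
        (PySem.Dict.empty.insert (PySem.Str.strip (PySem.Str.slice h (some 4) none))
          (PySem.Str.strip (PySem.Str.join "\n"
            (t.takeWhile (fun l => !PySem.Str.startswith l "### ")))))).items,
        p.1 ≠ "" ∧ PySem.Str.strip p.2 = p.2 := by
      have h0 := pv_loop_inv (h :: t).length (h :: t) PySem.Dict.empty (Nat.le_refl _)
        (by
          intro l hl
          rcases List.mem_cons.mp hl with rfl | hl'
          · exact hnames l hmem_h
          · exact hnames l (hmem_t l hl'))
        (by intro h0 hh0; rw [List.head?_cons] at hh0; cases hh0; exact hh)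
        (by intro p hp; rw [hempty] at hp; exact (List.not_mem_nil hp).elim)
      rw [pvBLoop_cons] at h0
      exact h0
    rw [List.foldl_cons, List.nil_append, pvAStep_header_none _ _ _ _ hh,
      pv_userPhase t _ PySem.Dict.empty _ [] hn (fun x hx hb => hnames x (hmem_t x hx) hb),
      pvBLoop_cons]
    simp only [List.nil_append]
    rw [pv_cleanedEq _ _ hinv]

-- ===== VERDICT (by name: the statement is the Claim_ definition above) =====
theorem parse_special_user_blocks_py_spec : Claim_equal_parse_special_user_blocks_py := by
  unfold Claim_equal_parse_special_user_blocks_py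
  intro s _
  unfold Spec_parse_special_user_blocks_py
  exact pv_mainEq s
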